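-- pv_equiv track=rewrite | github.com/DSIMB/PoincareMSA | scripts/prepare_data/compute_weight_sequence-py3.py | filter_ali_car
-- ===== SOURCE A (Python) =====
-- def car_in_alipos(ali, pos, car):
--     """ Returns True if car is in alignment ali in position pos """
--     for i in ali:
--         if i[pos] == car:
--             return True
--     return False
--
-- def filter_ali_car(ali, car):
--     """ Returns positions of the alignment not containing car """
--     handled_pos = [i for i in range(len(ali[0]))
--     if not car_in_alipos(ali, i, car)]
--
--     filtered_ali = []
--     for i in range(len(ali)):
--         filtered_seq = ''
--         for j in handled_pos:
--             filtered_seq += ali[i][j]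
--         filtered_ali.append(filtered_seq)
--     return filtered_ali
-- ===== SOURCE B (Python) =====
-- def filter_ali_car(ali, car):
--     """ Returns positions of the alignment not containing car """
--     # Single row-major pass: fold an elementwise boolean keep-mask over the rows,
--     # then compress each row against the final mask.
--     keep = [True] * len(ali[0])
--     for row in ali:
--         keep = [k and c != car for k, c in zip(keep, row)]
--     return [''.join(c for c, k in zip(row, keep) if k) for row in ali]
-- ===== Notes on version B (the rewrite author's own statement) =====
-- stated objective: alternative
-- what changed: B makes one row-major pass that folds an elementwise boolean keep-mask over the rows (mask[j] &= row[j] != car), then compresses each row by zipping it with the final mask; A works column-major, rescanning all rows per column with early exit to build an index list and then re-indexing each row character by character.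
-- outside the precondition, e.g. on filter_ali_car(['ab', 'b'], 'b'): A returns ['', ''], B returns ['', '']
import Mathlib
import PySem

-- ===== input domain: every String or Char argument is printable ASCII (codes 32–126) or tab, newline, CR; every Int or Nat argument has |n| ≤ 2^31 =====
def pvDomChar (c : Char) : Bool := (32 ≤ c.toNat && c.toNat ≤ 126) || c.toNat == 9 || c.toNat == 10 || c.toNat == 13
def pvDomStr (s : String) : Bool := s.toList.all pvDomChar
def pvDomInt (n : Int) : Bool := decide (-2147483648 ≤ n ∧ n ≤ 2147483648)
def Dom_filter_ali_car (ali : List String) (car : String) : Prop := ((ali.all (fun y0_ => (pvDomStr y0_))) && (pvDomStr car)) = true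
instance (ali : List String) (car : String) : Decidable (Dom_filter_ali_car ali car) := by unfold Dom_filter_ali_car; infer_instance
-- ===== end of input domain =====

-- B folds an elementwise boolean keep-mask over the rows in one row-major pass and then
-- compresses each row against the mask; A works column-major with index lists. Objective: alternative.

-- ===== PORT A =====
-- i[pos] == car : Python compares the 1-char string i[pos] with car; `none` = IndexError (excluded by Pre_).
def carInAlipos (ali : List String) (pos : Int) (car : String) : Bool :=
  match ali with
  | [] => false
  | i :: rest =>
    match PySem.Str.pyGet? i pos with
    | some c => if [c] == car.toList then true else carInAlipos rest pos car
    | none => false   -- IndexError in Python; unreachable under Pre_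

def filter_ali_car (ali : List String) (car : String) : List String :=
  -- len(ali[0]): IndexError on empty ali, excluded by Pre_
  let len0 : Int := match PySem.List.pyGet? ali 0 with
    | some s => PySem.Str.len s
    | none => 0
  let handled_pos := (PySem.List.pyRange 0 len0 1).filter (fun i => ! carInAlipos ali i car)
  (PySem.List.pyRange 0 (ali.length : Int) 1).map (fun i =>
    let row := PySem.List.pyGetD ali i ""
    -- filtered_seq += ali[i][j]
    String.ofList (handled_pos.foldl (fun acc j =>
      acc ++ (match PySem.Str.pyGet? row j with | some c => [c] | none => [])) []))

-- ===== PORT B =====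
-- keep = [k and c != car for k, c in zip(keep, row)]  (c is a 1-char string, so c != car is ![c] == car.toList)
def maskStep (car : String) (keep : List Bool) (row : String) : List Bool :=
  (keep.zip row.toList).map (fun p => p.1 && !([p.2] == car.toList))

def filter_ali_car_alt (ali : List String) (car : String) : List String :=
  let keep0 := List.replicate (ali.headD "").toList.length true   -- [True] * len(ali[0])
  let keep := ali.foldl (maskStep car) keep0
  ali.map (fun row =>
    String.ofList (((row.toList.zip keep).filter (fun p => p.2)).map (fun p => p.1)))

-- ===== PRECONDITION & SPEC =====
-- Pre_ excludes the empty alignment and ragged alignments with a row shorter than the first row: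
-- on the former A raises IndexError on ali[0], and on most of the latter A raises IndexError inside
-- car_in_alipos (it returns only when the character happens to occur earlier at every short position).
def Pre_filter_ali_car (ali : List String) (car : String) : Prop :=
  ali ≠ [] ∧ ∀ s ∈ ali, (ali.headD "").toList.length ≤ s.toList.length
instance (ali : List String) (car : String) : Decidable (Pre_filter_ali_car ali car) := by
  unfold Pre_filter_ali_car; infer_instance

def pvWitness_filter_ali_car : List String × String := (["abc", "axc"], "x")

def Spec_filter_ali_car (ali : List String) (car : String) (out : List String) : Prop := out = filter_ali_car_alt ali car
instance (ali : List String) (car : String) (out : List String) : Decidable (Spec_filter_ali_car ali car out) := by unfold Spec_filter_ali_car; infer_instance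

-- ===== CLAIM (what is proved, stated in full; the proofs are below) =====
def Claim_equal_filter_ali_car : Prop := ∀ (ali : List String) (car : String), Dom_filter_ali_car ali car → Pre_filter_ali_car ali car → Spec_filter_ali_car ali car (filter_ali_car ali car)

-- ===== LEMMAS AND PROOFS =====

theorem flatMap_eq_map_of_singleton {α β : Type} (l : List α) (f : α → List β) (g : α → β)
    (h : ∀ x ∈ l, f x = [g x]) : l.flatMap f = l.map g := by
  induction l with
  | nil => rfl
  | cons x xs ih =>
    simp only [List.flatMap_cons, List.map_cons, h x (by simp)]
    rw [ih (fun y hy => h y (by simp [hy]))]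
    rfl

-- zipping a list with a masked range reads it positionally (both orientations)
theorem zip_map_range {α : Type} (xs : List α) (d : α) (L : Nat) (f : Nat → Bool)
    (h : L ≤ xs.length) :
    xs.zip ((List.range L).map f) = (List.range L).map (fun j => (xs.getD j d, f j)) := by
  apply List.ext_getElem
  · simp; omega
  · intro j h1 h2
    simp at h1
    simp [List.getElem_zip, List.getD_eq_getElem?_getD,
      List.getElem?_eq_getElem (by omega : j < xs.length)]

theorem map_range_zip {α : Type} (xs : List α) (d : α) (L : Nat) (f : Nat → Bool)
    (h : L ≤ xs.length) :
    ((List.range L).map f).zip xs = (List.range L).map (fun j => (f j, xs.getD j d)) := by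
  apply List.ext_getElem
  · simp; omega
  · intro j h1 h2
    simp at h1
    simp [List.getElem_zip, List.getD_eq_getElem?_getD,
      List.getElem?_eq_getElem (by omega : j < xs.length)]

-- the fold of the mask step, with a general masked-range accumulator
theorem foldl_maskStep (car : String) (L : Nat) :
    ∀ (ali : List String) (f : Nat → Bool), (∀ s ∈ ali, L ≤ s.toList.length) →
    ali.foldl (maskStep car) ((List.range L).map f)
      = (List.range L).map (fun j =>
          f j && ! ali.any (fun s => [s.toList.getD j ' '] == car.toList)) := by
  intro ali
  induction ali with
  | nil => intro f _; simp
  | cons s rest ih =>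
    intro f hlen
    have hs : L ≤ s.toList.length := hlen s (by simp)
    have hstep : maskStep car ((List.range L).map f) s
        = (List.range L).map (fun j => f j && !([s.toList.getD j ' '] == car.toList)) := by
      unfold maskStep
      rw [map_range_zip s.toList ' ' L f hs, List.map_map]
      rfl
    rw [List.foldl_cons, hstep, ih _ (fun t ht => hlen t (by simp [ht]))]
    apply List.map_congr_left
    intro j _
    simp [List.any_cons, Bool.not_or, Bool.and_assoc]

-- carInAlipos at an in-range position is an `any` over the rows
theorem carInAlipos_eq (car : String) (j : Nat) :
    ∀ ali : List String, (∀ s ∈ ali, j < s.toList.length) →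
    carInAlipos ali (j : Int) car = ali.any (fun s => [s.toList.getD j ' '] == car.toList) := by
  intro ali
  induction ali with
  | nil => intro _; rfl
  | cons s rest ih =>
    intro hlt
    have hj : j < s.toList.length := hlt s (by simp)
    have hget : PySem.Str.pyGet? s (j : Int) = some (s.toList.getD j ' ') := by
      simp [List.getElem?_eq_getElem hj]
    simp only [carInAlipos, hget, List.any_cons]
    rw [ih (fun t ht => hlt t (by simp [ht]))]
    cases hbe : ([s.toList.getD j ' '] == car.toList) <;> simp

theorem map_range_getD {α β : Type} (l : List α) (d : α) (g : α → β) :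
    (List.range l.length).map (fun k => g (l.getD k d)) = l.map g := by
  apply List.ext_getElem
  · simp
  · intro j h1 h2
    simp at h1
    simp [List.getD_eq_getElem?_getD, List.getElem?_eq_getElem (by omega : j < l.length)]

-- ===== VERDICT (by name: the statement is the Claim_ definition above) =====
theorem filter_ali_car_spec : Claim_equal_filter_ali_car := by
  intro ali car _ hpre
  obtain ⟨hne, hlen⟩ := hpre
  unfold Spec_filter_ali_car filter_ali_car filter_ali_car_alt
  dsimp only
  cases ali with
  | nil => exact absurd rfl hne
  | cons r0 rest =>
  set ali := r0 :: rest with hali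
  set L := r0.toList.length with hL
  have hlen' : ∀ s ∈ ali, L ≤ s.toList.length := by simpa using hlen
  -- len(ali[0]) = L
  have hlen0 : (match PySem.List.pyGet? ali 0 with
      | some s => PySem.Str.len s
      | none => 0) = (L : Int) := by
    simp [hali, PySem.List.pyGet?, PySem.List.pyIdx?, PySem.Str.len, hL]
  -- keepF j : no row has car at column j
  set keepF : Nat → Bool := fun j => ! ali.any (fun s => [s.toList.getD j ' '] == car.toList)
    with hkeepF
  have hkeep0 : List.replicate (ali.headD "").toList.length true
      = (List.range L).map (fun _ => true) := by
    simp [hali, hL, List.map_const']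
  have hkeep : ali.foldl (maskStep car) (List.replicate (ali.headD "").toList.length true)
      = (List.range L).map keepF := by
    rw [hkeep0, foldl_maskStep car L ali (fun _ => true) hlen']
    simp [hkeepF]
  rw [hlen0, hkeep]
  -- A's outer map over pyRange 0 |ali| 1 with pyGetD is a map over ali
  rw [PySem.List.pyRange_zero_nat, PySem.List.pyRange_zero_nat, List.map_map]
  have houter : ∀ g : String → String,
      (List.map ((fun i => g (PySem.List.pyGetD ali i "")) ∘ (fun k : Nat => (k : Int)))
        (List.range ali.length)) = ali.map g := by
    intro g
    have : ∀ k : Nat, PySem.List.pyGetD ali (k : Int) "" = ali.getD k "" := by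
      intro k
      rw [PySem.List.pyGetD_of_nonneg (h := by positivity)]
      simp [List.getD_eq_getElem?_getD]
    calc List.map ((fun i => g (PySem.List.pyGetD ali i "")) ∘ (fun k : Nat => (k : Int)))
          (List.range ali.length)
        = (List.range ali.length).map (fun k => g (ali.getD k "")) := by
          apply List.map_congr_left; intro k _; simp [Function.comp, this k]
      _ = ali.map g := map_range_getD ali "" g
  rw [houter (fun row => String.ofList (List.foldl (fun acc j =>
        acc ++ (match PySem.Str.pyGet? row j with | some c => [c] | none => [])) []
        (List.filter (fun i => !carInAlipos ali i car)
          (List.map (fun k : Nat => (k : Int)) (List.range L)))))]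
  apply List.map_congr_left
  intro row hrowmem
  have hrowlen : L ≤ row.toList.length := hlen' row hrowmem
  refine congrArg String.ofList ?_
  -- A side: the per-row foldl is a map over the filtered positions
  rw [PySem.List.foldl_append_eq_flatMap, List.nil_append,
      List.filter_map, List.flatMap_map]
  have hfilt : List.filter ((fun i => !carInAlipos ali i car) ∘ fun k : Nat => (k : Int))
        (List.range L) = List.filter keepF (List.range L) := by
    apply List.filter_congr
    intro j hjr
    have hjL : j < L := List.mem_range.1 hjr
    have hlt : ∀ s ∈ ali, j < s.toList.length :=
      fun s hs => lt_of_lt_of_le hjL (hlen' s hs)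
    simp only [Function.comp_apply, hkeepF]
    rw [carInAlipos_eq car j ali hlt]
  rw [hfilt]
  refine Eq.trans (b := ((List.range L).filter keepF).map (fun j => row.toList.getD j ' ')) ?_ ?_
  · apply flatMap_eq_map_of_singleton
    intro j hj
    have hjL : j < L := List.mem_range.1 (List.mem_filter.1 hj).1
    have hjrow : j < row.toList.length := lt_of_lt_of_le hjL hrowlen
    simp [List.getElem?_eq_getElem hjrow]
  -- B side: zip with the mask, filter, project
  rw [zip_map_range row.toList ' ' L keepF hrowlen, List.filter_map, List.map_map]
  have : List.filter ((fun p : Char × Bool => p.2) ∘ fun j => (row.toList.getD j ' ', keepF j))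
      (List.range L) = (List.range L).filter keepF := rfl
  rw [this]
  rfl
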